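-- pv_equiv track=rewrite | github.com/emilywiggins44-debug/daily-brief | sheets_reader.py | get_active_companies
-- ===== SOURCE A (Python) =====
-- def get_active_companies(companies):
--     """Return active companies sorted by priority."""
--     active_stages = [
--         "Applied", "Screening", "Interviewing",
--         "Final Round", "Offer"
--     ]
--     priority_order = {"High": 0, "Medium": 1, "Low": 2}
--
--     active = [
--         c for c in companies
--         if c.get("Stage", "") in active_stages
--     ]
--
--     return sorted(
--         active,
--         key=lambda c: priority_order.get(c.get("Priority", "Low"), 2)
--     )
-- ===== SOURCE B (Python) =====
-- def get_active_companies(companies):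
--     """Return active companies sorted by priority."""
--     active_stages = [
--         "Applied", "Screening", "Interviewing",
--         "Final Round", "Offer"
--     ]
--     priority_order = {"High": 0, "Medium": 1, "Low": 2}
--
--     buckets = [[], [], []]
--     for c in companies:
--         if c.get("Stage", "") in active_stages:
--             buckets[priority_order.get(c.get("Priority", "Low"), 2)].append(c)
--     return buckets[0] + buckets[1] + buckets[2]
-- ===== Notes on version B (the rewrite author's own statement) =====
-- stated objective: alternative
-- what changed: Replaced the sorted() call with a single-pass 3-bucket counting sort: each active company is appended to the High/Medium/Low bucket and the buckets are concatenated, reproducing the stable sort exactly.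
import Mathlib
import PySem

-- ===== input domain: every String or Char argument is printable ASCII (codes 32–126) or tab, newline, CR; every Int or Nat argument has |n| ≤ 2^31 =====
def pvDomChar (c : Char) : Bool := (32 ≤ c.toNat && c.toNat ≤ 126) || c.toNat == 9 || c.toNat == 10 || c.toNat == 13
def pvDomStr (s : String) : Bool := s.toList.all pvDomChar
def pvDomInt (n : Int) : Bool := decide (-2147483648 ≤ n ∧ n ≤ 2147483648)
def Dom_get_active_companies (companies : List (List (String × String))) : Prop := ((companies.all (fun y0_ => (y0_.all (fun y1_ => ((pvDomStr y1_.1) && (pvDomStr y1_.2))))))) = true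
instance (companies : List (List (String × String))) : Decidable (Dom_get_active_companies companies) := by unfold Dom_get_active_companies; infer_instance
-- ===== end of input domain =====

-- B replaces the sorted() call with a single-pass 3-bucket (High/Medium/Low) counting sort and concatenates the buckets; objective: alternative algorithm, same results.

-- Shared literal constants of both Pythons
def pvStages : List String := ["Applied", "Screening", "Interviewing", "Final Round", "Offer"]
def pvPrio : PySem.Dict String Int := ⟨[("High", 0), ("Medium", 1), ("Low", 2)]⟩
-- priority_order.get(c.get("Priority", "Low"), 2) — the sort key both Pythons compute
def pvKey (c : List (String × String)) : Int :=
  PySem.Dict.getD pvPrio (PySem.Dict.getD ⟨c⟩ "Priority" "Low") 2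
-- c.get("Stage", "") in active_stages
def pvActive (c : List (String × String)) : Bool :=
  pvStages.contains (PySem.Dict.getD ⟨c⟩ "Stage" "")

-- ===== PORT A =====
def get_active_companies (companies : List (List (String × String))) : List (List (String × String)) :=
  let active := companies.filter (fun c => pvActive c)
  PySem.List.sorted active (fun c => pvKey c) false

-- ===== PORT B =====
-- the 'for c in companies: … buckets[i].append(c)' loop as a foldl over the triple of buckets
def pvStep (b : List (List (String × String)) × List (List (String × String)) × List (List (String × String)))
    (c : List (String × String)) :
    List (List (String × String)) × List (List (String × String)) × List (List (String × String)) :=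
  if pvActive c then
    let i := pvKey c
    if i = 0 then (b.1 ++ [c], b.2.1, b.2.2)
    else if i = 1 then (b.1, b.2.1 ++ [c], b.2.2)
    else (b.1, b.2.1, b.2.2 ++ [c])
  else b

def get_active_companies_alt (companies : List (List (String × String))) : List (List (String × String)) :=
  let buckets := companies.foldl pvStep ([], [], [])
  buckets.1 ++ buckets.2.1 ++ buckets.2.2

-- ===== PRECONDITION & SPEC =====
def Spec_get_active_companies (companies : List (List (String × String))) (out : List (List (String × String))) : Prop := out = get_active_companies_alt companies
instance (companies : List (List (String × String))) (out : List (List (String × String))) : Decidable (Spec_get_active_companies companies out) := by unfold Spec_get_active_companies; infer_instance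

-- ===== CLAIM (what is proved, stated in full; the proofs are below) =====
def Claim_equal_get_active_companies : Prop := ∀ (companies : List (List (String × String))), Dom_get_active_companies companies → Spec_get_active_companies companies (get_active_companies companies)

-- ===== LEMMAS AND PROOFS =====

theorem pvKey_range (c : List (String × String)) : pvKey c = 0 ∨ pvKey c = 1 ∨ pvKey c = 2 := by
  unfold pvKey pvPrio
  generalize PySem.Dict.getD ⟨c⟩ "Priority" "Low" = p
  by_cases h0 : p = "High"
  · left; simp [PySem.Dict.getD, PySem.Dict.get?, h0]
  · by_cases h1 : p = "Medium"
    · right; left; simp [PySem.Dict.getD, PySem.Dict.get?, h1]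
    · by_cases h2 : p = "Low"
      · right; right; simp [PySem.Dict.getD, PySem.Dict.get?, h2]
      · right; right
        simp [PySem.Dict.getD, PySem.Dict.get?, List.find?,
          beq_eq_false_iff_ne.mpr (Ne.symm h0), beq_eq_false_iff_ne.mpr (Ne.symm h1),
          beq_eq_false_iff_ne.mpr (Ne.symm h2)]

-- insert between a block of non-before elements and a block of before elements
theorem pv_insertBy_between {α : Type} (before : α → α → Bool) (x : α) (as bs : List α)
    (ha : ∀ y ∈ as, before x y = false) (hb : ∀ y ∈ bs, before x y = true) :
    PySem.List.insertBy before x (as ++ bs) = as ++ x :: bs := by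
  induction as with
  | nil =>
    cases bs with
    | nil => simp [PySem.List.insertBy]
    | cons h t => simp [PySem.List.insertBy, hb h (by simp)]
  | cons a as ih =>
    have h1 : before x a = false := ha a (by simp)
    simp only [List.cons_append, PySem.List.insertBy, h1]
    simp [ih (fun y hy => ha y (by simp [hy]))]

def pvBucket (i : Int) (xs : List (List (String × String))) : List (List (String × String)) :=
  xs.filter (fun c => pvKey c = i)

theorem pv_mem_bucket {i : Int} {xs : List (List (String × String))} {y : List (String × String)}
    (h : y ∈ pvBucket i xs) : pvKey y = i := by
  have := (List.mem_filter.mp h).2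
  simpa using this

theorem pv_sorted_eq_buckets (xs : List (List (String × String))) :
    PySem.List.sorted xs (fun c => pvKey c) false =
      pvBucket 0 xs ++ pvBucket 1 xs ++ pvBucket 2 xs := by
  induction xs using List.reverseRecOn with
  | nil => simp [PySem.List.sorted, pvBucket]
  | append_singleton xs x ih =>
    have hstep : PySem.List.sorted (xs ++ [x]) (fun c => pvKey c) false =
        PySem.List.insertBy (fun a b => decide (pvKey a < pvKey b)) x
          (PySem.List.sorted xs (fun c => pvKey c) false) := by
      simp [PySem.List.sorted, List.foldl_append]
    rw [hstep, ih]
    have hb0 : ∀ i, pvBucket i (xs ++ [x]) = pvBucket i xs ++ (if pvKey x = i then [x] else []) := by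
      intro i; simp [pvBucket, List.filter_append]; split_ifs with h <;> simp [h]
    rcases pvKey_range x with hk | hk | hk
    · rw [List.append_assoc]
      rw [pv_insertBy_between _ x (pvBucket 0 xs) (pvBucket 1 xs ++ pvBucket 2 xs)
        (fun y hy => by simp [pv_mem_bucket hy, hk])
        (fun y hy => by
          rcases List.mem_append.mp hy with h | h <;>
            simp [pv_mem_bucket h, hk])]
      simp [hb0, hk]
    · rw [show pvBucket 0 xs ++ pvBucket 1 xs ++ pvBucket 2 xs =
          (pvBucket 0 xs ++ pvBucket 1 xs) ++ pvBucket 2 xs by simp]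
      rw [pv_insertBy_between _ x (pvBucket 0 xs ++ pvBucket 1 xs) (pvBucket 2 xs)
        (fun y hy => by
          rcases List.mem_append.mp hy with h | h <;>
            simp [pv_mem_bucket h, hk])
        (fun y hy => by simp [pv_mem_bucket hy, hk])]
      simp [hb0, hk]
    · rw [show pvBucket 0 xs ++ pvBucket 1 xs ++ pvBucket 2 xs =
          (pvBucket 0 xs ++ pvBucket 1 xs ++ pvBucket 2 xs) ++ [] by simp]
      rw [pv_insertBy_between _ x (pvBucket 0 xs ++ pvBucket 1 xs ++ pvBucket 2 xs) []
        (fun y hy => by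
          rcases List.mem_append.mp hy with h | h
          · rcases List.mem_append.mp h with h' | h' <;>
              simp [pv_mem_bucket h', hk]
          · simp [pv_mem_bucket h, hk])
        (fun y hy => by simp at hy)]
      simp [hb0, hk]

theorem pv_foldl_buckets (cs : List (List (String × String)))
    (b0 b1 b2 : List (List (String × String))) :
    cs.foldl pvStep (b0, b1, b2) =
      (b0 ++ pvBucket 0 (cs.filter (fun c => pvActive c)),
       b1 ++ pvBucket 1 (cs.filter (fun c => pvActive c)),
       b2 ++ pvBucket 2 (cs.filter (fun c => pvActive c))) := by
  induction cs generalizing b0 b1 b2 with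
  | nil => simp [pvBucket]
  | cons c cs ih =>
    by_cases hc : pvActive c
    · rcases pvKey_range c with hk | hk | hk <;>
        simp [List.foldl_cons, pvStep, hc, hk, ih, pvBucket]
    · simp [List.foldl_cons, pvStep, hc, ih, pvBucket]

-- ===== VERDICT (by name: the statement is the Claim_ definition above) =====
theorem get_active_companies_spec : Claim_equal_get_active_companies := by
  intro companies _
  unfold Spec_get_active_companies get_active_companies get_active_companies_alt
  rw [pv_foldl_buckets, pv_sorted_eq_buckets]
  simp
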